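-- pv_equiv track=rewrite | github.com/SquGus/ai-uninformed-search | search_ia.py | incons_heuristic_cost
-- ===== SOURCE A (Python) =====
-- def incons_heuristic_cost(current_stacks,goal_stacks):
-- 	# calcular manhattan?
-- 	# Se esta calculando a partir de cuantos stacks se tiene que mover cada caja
-- 	total = 0
-- 	for i,stack in enumerate(goal_stacks):
-- 		if stack == 'X':
-- 			pass
-- 		else:
-- 			for j,box in enumerate(stack):
-- 				for k, current_stack in enumerate(current_stacks):
-- 					if box in current_stack:
-- 						total += (abs(k-i)) * (abs(k-i))
-- 	return total
-- ===== SOURCE B (Python) =====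
-- def incons_heuristic_cost(current_stacks, goal_stacks):
--     # One pass over current_stacks builds per-box aggregates (count, sum k, sum k^2),
--     # then each goal box occurrence contributes a closed form instead of rescanning.
--     agg = {}
--     for k, cs in enumerate(current_stacks):
--         for box in set(cs):
--             c, s, s2 = agg.get(box, (0, 0, 0))
--             agg[box] = (c + 1, s + k, s2 + k * k)
--     total = 0
--     for i, gs in enumerate(goal_stacks):
--         if gs == 'X':
--             continue
--         for box in gs:
--             c, s, s2 = agg.get(box, (0, 0, 0))
--             total += s2 - 2 * i * s + i * i * c
--     return total
-- ===== Notes on version B (the rewrite author's own statement) =====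
-- stated objective: faster
-- what changed: Replaces the triple nested loop (every goal box rescans every current stack) by a single pass over current_stacks building per-box aggregates (count, sum of indices, sum of squared indices) in a dict, so each goal box occurrence is a O(1) closed-form lookup sumk2 - 2*i*sumk + i*i*count.
import Mathlib
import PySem

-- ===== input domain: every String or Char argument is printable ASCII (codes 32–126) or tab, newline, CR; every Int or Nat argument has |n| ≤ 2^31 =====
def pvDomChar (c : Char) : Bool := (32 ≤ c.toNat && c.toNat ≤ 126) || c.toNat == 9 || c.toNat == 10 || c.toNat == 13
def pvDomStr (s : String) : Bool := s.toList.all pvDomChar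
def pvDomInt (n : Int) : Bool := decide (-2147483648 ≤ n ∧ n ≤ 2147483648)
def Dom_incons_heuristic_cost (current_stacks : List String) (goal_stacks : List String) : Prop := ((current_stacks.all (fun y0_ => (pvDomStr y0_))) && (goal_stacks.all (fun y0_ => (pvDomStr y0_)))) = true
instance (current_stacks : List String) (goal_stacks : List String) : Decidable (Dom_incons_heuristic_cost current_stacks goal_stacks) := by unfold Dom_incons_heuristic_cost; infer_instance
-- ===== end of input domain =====

-- B replaces A's triple nested loop by one aggregation pass over current_stacks plus a
-- closed-form lookup per goal box; proved to return the same total on all inputs.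


-- ===== PORT A =====
def incons_heuristic_cost (current_stacks : List String) (goal_stacks : List String) : Int :=
  (PySem.List.enumerate goal_stacks).foldl (fun total is =>
    if is.2 == "X" then total
    else (PySem.List.enumerate is.2.toList).foldl (fun t jb =>
      (PySem.List.enumerate current_stacks).foldl (fun t2 kc =>
        if kc.2.toList.contains jb.2 then
          t2 + ((kc.1 - is.1).natAbs : Int) * ((kc.1 - is.1).natAbs : Int)
        else t2) t) total) 0

-- ===== PORT B =====
def incons_heuristic_cost_alt (current_stacks : List String) (goal_stacks : List String) : Int :=
  let agg : PySem.Dict Char (Int × Int × Int) :=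
    (PySem.List.enumerate current_stacks).foldl (fun d kc =>
      (PySem.Set.ofList kc.2.toList).foldl (fun d box =>
        let t := d.getD box (0, 0, 0)
        d.insert box (t.1 + 1, t.2.1 + kc.1, t.2.2 + kc.1 * kc.1)) d) PySem.Dict.empty
  (PySem.List.enumerate goal_stacks).foldl (fun total ig =>
    if ig.2 == "X" then total
    else ig.2.toList.foldl (fun t box =>
      let p := agg.getD box (0, 0, 0)
      t + (p.2.2 - 2 * ig.1 * p.2.1 + ig.1 * ig.1 * p.1)) total) 0

-- ===== PRECONDITION & SPEC =====
def Spec_incons_heuristic_cost (current_stacks : List String) (goal_stacks : List String) (out : Int) : Prop := out = incons_heuristic_cost_alt current_stacks goal_stacks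
instance (current_stacks : List String) (goal_stacks : List String) (out : Int) : Decidable (Spec_incons_heuristic_cost current_stacks goal_stacks out) := by unfold Spec_incons_heuristic_cost; infer_instance

-- ===== CLAIM (what is proved, stated in full; the proofs are below) =====
def Claim_equal_incons_heuristic_cost : Prop := ∀ (current_stacks : List String) (goal_stacks : List String), Dom_incons_heuristic_cost current_stacks goal_stacks → Spec_incons_heuristic_cost current_stacks goal_stacks (incons_heuristic_cost current_stacks goal_stacks)

-- ===== LEMMAS AND PROOFS =====

-- per-box aggregates over an enumerated list of stacks
def pvCnt (l : List (Int × String)) (b : Char) : Int :=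
  ((l.filter (fun kc => kc.2.toList.contains b)).length : Int)
def pvSk (l : List (Int × String)) (b : Char) : Int :=
  ((l.filter (fun kc => kc.2.toList.contains b)).map (·.1)).sum
def pvSk2 (l : List (Int × String)) (b : Char) : Int :=
  ((l.filter (fun kc => kc.2.toList.contains b)).map (fun kc => kc.1 * kc.1)).sum

lemma pvCnt_cons (kc : Int × String) (l : List (Int × String)) (b : Char) :
    pvCnt (kc :: l) b = (if b ∈ kc.2.toList then 1 else 0) + pvCnt l b := by
  simp only [pvCnt, List.filter_cons]
  by_cases h : b ∈ kc.2.toList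
  · have hc : kc.2.toList.contains b = true := by simpa using h
    simp [h]
    omega
  · have hc : kc.2.toList.contains b = false := by simpa using h
    simp [hc, h]

lemma pvSk_cons (kc : Int × String) (l : List (Int × String)) (b : Char) :
    pvSk (kc :: l) b = (if b ∈ kc.2.toList then kc.1 else 0) + pvSk l b := by
  simp only [pvSk, List.filter_cons]
  split_ifs with h <;> simp_all

lemma pvSk2_cons (kc : Int × String) (l : List (Int × String)) (b : Char) :
    pvSk2 (kc :: l) b = (if b ∈ kc.2.toList then kc.1 * kc.1 else 0) + pvSk2 l b := by
  simp only [pvSk2, List.filter_cons]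
  split_ifs with h <;> simp_all

-- A's innermost loop over the current stacks as a closed form in the aggregates
lemma innerA (l : List (Int × String)) (i : Int) (b : Char) (t : Int) :
    l.foldl (fun t2 kc =>
        if kc.2.toList.contains b then
          t2 + ((kc.1 - i).natAbs : Int) * ((kc.1 - i).natAbs : Int)
        else t2) t
      = t + (pvSk2 l b - 2 * i * pvSk l b + i * i * pvCnt l b) := by
  induction l generalizing t with
  | nil => simp [pvCnt, pvSk, pvSk2]
  | cons kc rest ih =>
    simp only [List.foldl_cons]
    rw [ih, pvCnt_cons, pvSk_cons, pvSk2_cons]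
    have hsq : (((kc.1 - i).natAbs : Int)) * (((kc.1 - i).natAbs : Int))
        = (kc.1 - i) * (kc.1 - i) := Int.natAbs_mul_self' _
    by_cases h : b ∈ kc.2.toList
    · have hc : kc.2.toList.contains b = true := by simpa using h
      rw [hc, if_pos h, if_pos h, if_pos h, if_pos rfl, hsq]
      ring
    · have hc : kc.2.toList.contains b = false := by simpa using h
      rw [hc, if_neg h, if_neg h, if_neg h, if_neg (by simp)]
      ring

-- one stack's set-loop updates exactly the entries of its member boxes, once each
lemma setFold (s : List Char) (hs : s.Nodup) (d : PySem.Dict Char (Int × Int × Int))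
    (k : Int) (b : Char) :
    ((s.foldl (fun d box =>
        let t := d.getD box (0, 0, 0)
        d.insert box (t.1 + 1, t.2.1 + k, t.2.2 + k * k)) d).getD b (0, 0, 0))
      = if b ∈ s then
          ((d.getD b (0, 0, 0)).1 + 1, (d.getD b (0, 0, 0)).2.1 + k,
           (d.getD b (0, 0, 0)).2.2 + k * k)
        else d.getD b (0, 0, 0) := by
  induction s generalizing d with
  | nil => simp
  | cons x rest ih =>
    simp only [List.foldl_cons]
    rcases List.nodup_cons.mp hs with ⟨hx, hrest⟩
    rw [ih hrest]
    by_cases hbx : b = x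
    · subst hbx
      simp [hx, PySem.Dict.getD_insert_self]
    · by_cases hbs : b ∈ rest
      · simp [hbs, hbx, PySem.Dict.getD_insert]
      · simp [List.mem_cons, hbs, hbx, PySem.Dict.getD_insert]

-- the aggregate dict built by B's first loop holds exactly the three sums
lemma aggD (l : List (Int × String)) (d : PySem.Dict Char (Int × Int × Int)) (b : Char) :
    ((l.foldl (fun d kc =>
        (PySem.Set.ofList kc.2.toList).foldl (fun d box =>
          let t := d.getD box (0, 0, 0)
          d.insert box (t.1 + 1, t.2.1 + kc.1, t.2.2 + kc.1 * kc.1)) d) d).getD b (0, 0, 0))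
      = ((d.getD b (0, 0, 0)).1 + pvCnt l b, (d.getD b (0, 0, 0)).2.1 + pvSk l b,
         (d.getD b (0, 0, 0)).2.2 + pvSk2 l b) := by
  induction l generalizing d with
  | nil => simp [pvCnt, pvSk, pvSk2]
  | cons kc rest ih =>
    simp only [List.foldl_cons]
    rw [ih]
    rw [setFold _ (PySem.Set.nodup_ofList _) d kc.1 b]
    rw [pvCnt_cons, pvSk_cons, pvSk2_cons]
    by_cases h : b ∈ kc.2.toList
    · rw [if_pos ((PySem.Set.mem_ofList _ _).mpr h), if_pos h, if_pos h, if_pos h]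
      refine Prod.ext (by ring) (Prod.ext (by ring) (by ring))
    · rw [if_neg (fun hm => h ((PySem.Set.mem_ofList _ _).mp hm)),
          if_neg h, if_neg h, if_neg h]
      refine Prod.ext (by ring) (Prod.ext (by ring) (by ring))

theorem incons_equal (current_stacks goal_stacks : List String) :
    incons_heuristic_cost current_stacks goal_stacks
      = incons_heuristic_cost_alt current_stacks goal_stacks := by
  simp only [incons_heuristic_cost, incons_heuristic_cost_alt]
  congr 1
  funext total is
  by_cases hX : is.2 == "X"
  · simp [hX]
  · simp only [hX, Bool.false_eq_true, if_false]
    generalize is.2.toList = chars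
    generalize is.1 = i
    -- strip the unused enumeration index on A's side, then compare char by char
    have key : ∀ (s : Int) (t : Int),
        (PySem.List.enumerate chars s).foldl (fun t jb =>
          (PySem.List.enumerate current_stacks).foldl (fun t2 kc =>
            if kc.2.toList.contains jb.2 then
              t2 + ((kc.1 - i).natAbs : Int) * ((kc.1 - i).natAbs : Int)
            else t2) t) t
        = chars.foldl (fun t box =>
            let p := ((PySem.List.enumerate current_stacks).foldl (fun d kc =>
              (PySem.Set.ofList kc.2.toList).foldl (fun d box =>
                let t := d.getD box (0, 0, 0)
                d.insert box (t.1 + 1, t.2.1 + kc.1, t.2.2 + kc.1 * kc.1)) d)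
                PySem.Dict.empty).getD box (0, 0, 0)
            t + (p.2.2 - 2 * i * p.2.1 + i * i * p.1)) t := by
      intro s t
      induction chars generalizing s t with
      | nil => simp
      | cons c cs ihc =>
        rw [PySem.List.enumerate_cons]
        simp only [List.foldl_cons]
        rw [ihc]
        congr 1
        rw [innerA, aggD]
        simp only [PySem.Dict.getD_empty]
        ring
    exact key 0 total

-- ===== VERDICT (by name: the statement is the Claim_ definition above) =====
theorem incons_heuristic_cost_spec : Claim_equal_incons_heuristic_cost := by
  intro cur goal _
  unfold Spec_incons_heuristic_cost
  exact incons_equal cur goal
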